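-- pv_equiv track=rewrite | github.com/matty-bo/advent-of-code | 2020/Day_17/day17.py | get_expanded_dim
-- ===== SOURCE A (Python) =====
-- from itertools import product
--
-- def get_neighbours(point):
--     neighbours = list(product([-1, 0, 1], repeat=len(point)))
--     neighbours.remove(tuple(0 for _ in range(len(point))))
--     neighbours = [tuple(point[dim] + n[dim]
--                         for dim in range(len(point)))
--                   for n in neighbours]
--     return neighbours
--
-- def get_expanded_dim(dim):
--     expanded_dim = {}
--     for point, state in dim.items():
--         neighbours = get_neighbours(point)
--         neighbours = {n: '.' for n in neighbours if n not in dim}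
--         expanded_dim.update(neighbours)
--     expanded_dim.update(dim)
--     return expanded_dim
-- ===== SOURCE B (Python) =====
-- def _cells(point):
--     """Closed neighbourhood of point (the 3^d cells at Chebyshev distance <= 1,
--     including point itself), built by recursive axis-by-axis expansion --
--     no offset tuples are ever enumerated."""
--     if not point:
--         return [()]
--     tails = _cells(point[1:])
--     return [(point[0] + d,) + t for d in (-1, 0, 1) for t in tails]
--
--
-- def get_expanded_dim(dim):
--     # Stage 1: one ordered, deduplicated list of the new inactive cells.
--     # The point itself is active, so filtering against dim drops it for free.
--     seen = set()
--     order = []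
--     for point in dim:
--         for cell in _cells(point):
--             if cell not in dim and cell not in seen:
--                 seen.add(cell)
--                 order.append(cell)
--     # Stage 2: construct the result in one step.
--     out = {cell: '.' for cell in order}
--     out.update(dim)
--     return out
-- ===== Notes on version B (the rewrite author's own statement) =====
-- stated objective: alternative
-- what changed: B never enumerates offset tuples: it builds each point's closed neighbourhood by recursive axis-by-axis expansion of absolute coordinates (relying on the point itself being active instead of removing the zero offset), dedupes the new inactive cells once into an ordered list with a seen-set, and constructs the result dict in a single comprehension plus one update, instead of A's itertools.product offset list, zero-tuple removal, and per-point dict-comprehension-then-update loop.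
import Mathlib
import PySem

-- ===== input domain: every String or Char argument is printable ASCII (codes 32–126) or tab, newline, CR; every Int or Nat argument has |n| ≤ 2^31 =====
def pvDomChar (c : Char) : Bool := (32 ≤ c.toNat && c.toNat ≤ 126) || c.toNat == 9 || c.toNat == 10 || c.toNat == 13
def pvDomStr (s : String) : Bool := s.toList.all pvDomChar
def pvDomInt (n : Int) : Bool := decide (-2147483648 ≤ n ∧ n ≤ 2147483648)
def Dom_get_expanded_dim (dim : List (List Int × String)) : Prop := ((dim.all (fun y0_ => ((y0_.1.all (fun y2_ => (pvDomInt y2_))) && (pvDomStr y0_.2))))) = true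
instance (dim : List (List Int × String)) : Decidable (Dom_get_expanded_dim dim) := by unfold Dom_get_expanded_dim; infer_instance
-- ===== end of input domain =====

-- B builds each point's closed neighbourhood by recursive axis-by-axis expansion
-- (no offset tuples, no zero-offset removal), collects the new inactive cells once
-- into an ordered deduplicated list, and constructs the result in one step
-- (objective: alternative decomposition, same asymptotic cost).
-- Return-value equivalence only; neither version mutates its argument.

-- ===== PORT A =====

-- itertools.product(xs, repeat=n): first coordinate varies slowest
def pvProductRepeat (xs : List Int) : Nat → List (List Int)
  | 0 => [[]]
  | n + 1 => xs.flatMap (fun x => (pvProductRepeat xs n).map (x :: ·))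

def get_neighbours (point : List Int) : List (List Int) :=
  let neighbours := pvProductRepeat [-1, 0, 1] point.length
  -- list.remove of the all-zero tuple: it is always present, so remove? is always `some`
  let neighbours := (PySem.List.remove? neighbours (List.replicate point.length (0 : Int))).getD []
  neighbours.map (fun n =>
    (PySem.List.pyRange 0 (point.length : Int) 1).map
      (fun d => PySem.List.pyGetD point d 0 + PySem.List.pyGetD n d 0))

def get_expanded_dim (dim : List (List Int × String)) : List (List Int × String) :=
  let d : PySem.Dict (List Int) String := PySem.Dict.mk dim
  let expanded := d.items.foldl
    (fun (e : PySem.Dict (List Int) String) ps =>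
      let neighbours := get_neighbours ps.1
      let nd := neighbours.foldl
        (fun (m : PySem.Dict (List Int) String) n =>
          if d.contains n then m else m.insert n ".") PySem.Dict.empty
      e.update nd.items)
    PySem.Dict.empty
  (expanded.update d.items).items

-- ===== PORT B =====

-- closed neighbourhood of `point` (3^d cells, the point included), by recursive
-- axis-by-axis expansion of absolute coordinates
def pvCells : List Int → List (List Int)
  | [] => [[]]
  | c :: rest =>
      let tails := pvCells rest
      ([-1, 0, 1] : List Int).flatMap (fun d => tails.map (fun t => (c + d) :: t))

def get_expanded_dim_alt (dim : List (List Int × String)) : List (List Int × String) :=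
  let dd : PySem.Dict (List Int) String := PySem.Dict.mk dim
  -- stage 1: one ordered, deduplicated list of the new inactive cells
  let st := dd.keys.foldl
    (fun (st : PySem.Set (List Int) × List (List Int)) point =>
      (pvCells point).foldl
        (fun (st : PySem.Set (List Int) × List (List Int)) cell =>
          if !dd.contains cell && !PySem.Set.contains st.1 cell then
            (PySem.Set.add st.1 cell, st.2 ++ [cell])
          else st) st)
    (PySem.Set.empty, [])
  -- stage 2: construct the result in one step
  let out := st.2.foldl
    (fun (m : PySem.Dict (List Int) String) cell => m.insert cell ".") PySem.Dict.empty
  (out.update dd.items).items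

-- ===== PRECONDITION & SPEC =====
def Spec_get_expanded_dim (dim : List (List Int × String)) (out : List (List Int × String)) : Prop := out = get_expanded_dim_alt dim
instance (dim : List (List Int × String)) (out : List (List Int × String)) : Decidable (Spec_get_expanded_dim dim out) := by unfold Spec_get_expanded_dim; infer_instance

-- ===== CLAIM (what is proved, stated in full; the proofs are below) =====
def Claim_equal_get_expanded_dim : Prop := ∀ (dim : List (List Int × String)), Dom_get_expanded_dim dim → Spec_get_expanded_dim dim (get_expanded_dim dim)

-- ===== LEMMAS AND PROOFS =====

-- proof-side name for A's offset list with the zero offset removed, as a filter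
def pvOffsets (d : Nat) : List (List Int) :=
  (pvProductRepeat [-1, 0, 1] d).filter (fun off => off.any (fun x => x != 0))

theorem pv_len_productRepeat (xs : List Int) (d : Nat) :
    ∀ l ∈ pvProductRepeat xs d, l.length = d := by
  induction d with
  | zero => intro l hl; simp [pvProductRepeat] at hl; simp [hl]
  | succ n ih =>
    intro l hl
    simp [pvProductRepeat] at hl
    obtain ⟨x, _, r, hr, rfl⟩ := hl
    simp [ih r hr]

theorem pv_nodup_productRepeat (xs : List Int) (h : xs.Nodup) (d : Nat) :
    (pvProductRepeat xs d).Nodup := by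
  induction d with
  | zero => simp [pvProductRepeat]
  | succ n ih =>
    rw [pvProductRepeat]
    refine List.nodup_flatMap.2 ⟨fun x _ => ih.map (fun a b hab => by injection hab), ?_⟩
    refine h.imp ?_
    intro a b hab
    simp only [Function.onFun]
    rw [List.disjoint_left]
    rintro l hl hl'
    rcases List.mem_map.1 hl with ⟨r, _, rfl⟩
    rcases List.mem_map.1 hl' with ⟨r', _, h'⟩
    exact hab (by injection h'.symm)

theorem pv_zero_mem_productRepeat (d : Nat) :
    List.replicate d (0 : Int) ∈ pvProductRepeat [-1, 0, 1] d := by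
  induction d with
  | zero => simp [pvProductRepeat]
  | succ n ih =>
    rw [pvProductRepeat, List.replicate_succ]
    simp only [List.mem_flatMap, List.mem_map]
    exact ⟨0, by simp, List.replicate n 0, ih, rfl⟩

theorem pv_remove_nodup (xs : List (List Int)) (v : List Int) (hn : xs.Nodup) (hm : v ∈ xs) :
    (PySem.List.remove? xs v).getD [] = xs.filter (fun x => x != v) := by
  have h1 := List.erase_eq_eraseIdx xs v
  have h2 : List.idxOf? v xs ≠ none := by
    simp [List.idxOf?_eq_none_iff, hm]
  obtain ⟨i, hi⟩ := Option.ne_none_iff_exists'.1 h2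
  rw [PySem.List.remove?, hi, Option.map_some, Option.getD_some]
  simp only [hi] at h1
  rw [← h1, hn.erase_eq_filter]

theorem pv_neighbours_eq (p : List Int) :
    get_neighbours p = (pvOffsets p.length).map (fun off => List.zipWith (· + ·) p off) := by
  rw [get_neighbours, pvOffsets]
  rw [pv_remove_nodup _ _ (pv_nodup_productRepeat _ (by decide) _) (pv_zero_mem_productRepeat p.length)]
  have hfil : (pvProductRepeat [-1,0,1] p.length).filter (fun x => x != List.replicate p.length 0)
      = (pvProductRepeat [-1,0,1] p.length).filter (fun off => off.any (fun x => x != 0)) := by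
    apply List.filter_congr
    intro off hoff
    have hl := pv_len_productRepeat _ _ off hoff
    rw [Bool.eq_iff_iff]
    simp only [bne_iff_ne, ne_eq, List.any_eq_true, List.eq_replicate_iff, hl, true_and]
    push Not
    constructor
    · intro h; obtain ⟨b, hb, hb0⟩ := h; exact ⟨b, hb, by simpa using hb0⟩
    · intro h; obtain ⟨b, hb, hb0⟩ := h; exact ⟨b, hb, by simpa using hb0⟩
  rw [hfil]
  apply List.map_congr_left
  intro n hn
  have hl := pv_len_productRepeat _ _ n (List.mem_of_mem_filter hn)
  rw [PySem.List.pyRange_zero_natCast, List.map_map]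
  apply List.ext_getElem
  · simp [hl]
  · intro i h1 h2
    simp only [List.getElem_map, List.getElem_range, Function.comp_apply,
      PySem.List.pyGetD_natCast, List.getElem_zipWith]
    simp at h1
    rw [List.getD_eq_getElem _ _ (by omega), List.getD_eq_getElem _ _ (by omega)]

-- B's closed neighbourhood is the full offset cube added to the point
theorem pv_cells_eq (p : List Int) :
    pvCells p = (pvProductRepeat [-1, 0, 1] p.length).map (fun off => List.zipWith (· + ·) p off) := by
  induction p with
  | nil => rfl
  | cons c rest ih =>
    show ([-1, 0, 1] : List Int).flatMap (fun d => (pvCells rest).map (fun t => (c + d) :: t)) = _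
    rw [List.length_cons, pvProductRepeat, List.map_flatMap]
    refine List.flatMap_congr ?_
    intro d _
    rw [ih, List.map_map, List.map_map]
    rfl

theorem pv_zipWith_replicate_zero (p : List Int) :
    List.zipWith (· + ·) p (List.replicate p.length 0) = p := by
  induction p with
  | nil => rfl
  | cons c rest ih => simp [List.replicate_succ, ih]

-- filtering against the grid makes the closed neighbourhood coincide with A's
-- neighbour list (the point itself is in the grid, so the centre drops out)
theorem pv_filter_cells (q : List Int → Bool) (p : List Int) (hp : q p = false) :
    (pvCells p).filter q = (get_neighbours p).filter q := by
  rw [pv_cells_eq, pv_neighbours_eq, pvOffsets, List.filter_map, List.filter_map,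
    List.filter_filter]
  congr 1
  apply List.filter_congr
  intro off hoff
  have hl := pv_len_productRepeat _ _ off hoff
  by_cases h : off.any (fun x => x != 0) = true
  · simp [h]
  · have : off = List.replicate p.length 0 := by
      rw [List.eq_replicate_iff]
      refine ⟨hl, fun b hb => ?_⟩
      by_contra hb0
      exact h (List.any_eq_true.2 ⟨b, hb, by simpa using hb0⟩)
    subst this
    simp [Function.comp, pv_zipWith_replicate_zero, hp, h]

-- the seen-set / order-list pair stays equal componentwise
theorem pv_pair_fold (q : List Int → Bool) (cells : List (List Int)) (s : List (List Int)) :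
    cells.foldl
      (fun (st : PySem.Set (List Int) × List (List Int)) cell =>
        if !q cell && !PySem.Set.contains st.1 cell then
          (PySem.Set.add st.1 cell, st.2 ++ [cell])
        else st) (s, s)
    = (cells.foldl (fun s c => if q c then s else PySem.Set.add s c) s,
       cells.foldl (fun s c => if q c then s else PySem.Set.add s c) s) := by
  induction cells generalizing s with
  | nil => rfl
  | cons c cells ih =>
    simp only [List.foldl_cons]
    cases hq : q c with
    | true =>
      have hL : ¬ (((!true && !PySem.Set.contains s c) = true)) := by simp
      rw [if_neg hL, if_pos (rfl : true = true)]
      exact ih s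
    | false =>
      have hR : ¬ (false = true) := by simp
      rw [if_neg hR]
      cases hc : PySem.Set.contains s c with
      | true =>
        have hadd : PySem.Set.add s c = s := by rw [PySem.Set.add, if_pos hc]
        have hL : ¬ (((!false && !true) = true)) := by simp
        rw [if_neg hL, hadd]
        exact ih s
      | false =>
        have hne : ¬ (PySem.Set.contains s c = true) := by rw [hc]; simp
        have hadd : PySem.Set.add s c = s ++ [c] := by rw [PySem.Set.add, if_neg hne]
        have hL : ((!false && !false) = true) := rfl
        rw [if_pos hL, hadd]
        exact ih (s ++ [c])

-- iterate the pair fold over all points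
theorem pv_pair_outer (q : List Int → Bool) (keys : List (List Int)) (s : List (List Int)) :
    keys.foldl
      (fun (st : PySem.Set (List Int) × List (List Int)) point =>
        (pvCells point).foldl
          (fun (st : PySem.Set (List Int) × List (List Int)) cell =>
            if !q cell && !PySem.Set.contains st.1 cell then
              (PySem.Set.add st.1 cell, st.2 ++ [cell])
            else st) st) (s, s)
    = (keys.foldl (fun s p => (pvCells p).foldl
        (fun s c => if q c then s else PySem.Set.add s c) s) s,
       keys.foldl (fun s p => (pvCells p).foldl
        (fun s c => if q c then s else PySem.Set.add s c) s) s) := by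
  induction keys generalizing s with
  | nil => rfl
  | cons k keys ih =>
    simp only [List.foldl_cons]
    rw [pv_pair_fold q (pvCells k) s]
    exact ih _

-- the grid-filtering fold is an ordered set update with the filtered cells
theorem pv_gfold_eq_update (q : List Int → Bool) (cells : List (List Int)) (s : PySem.Set (List Int)) :
    cells.foldl (fun s c => if q c then s else PySem.Set.add s c) s
    = PySem.Set.update s (cells.filter (fun c => !q c)) := by
  rw [PySem.Set.update, List.foldl_filter]
  apply PySem.List.foldl_congr_mem
  intro acc c _
  by_cases h : q c = true <;> simp [h]

theorem pv_insert_dot (ns : List (List Int)) (S : List (List Int)) :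
    ns.foldl (fun (m : PySem.Dict (List Int) String) n => m.insert n ".")
        (PySem.Dict.mk (S.map (fun k => (k, ".")))) =
      PySem.Dict.mk ((PySem.Set.update S ns).map (fun k => (k, "."))) := by
  induction ns generalizing S with
  | nil => rfl
  | cons n ns ih =>
    rw [List.foldl_cons]
    have hcont : (PySem.Dict.mk (S.map (fun k => (k, ".")))).contains n = S.contains n := by
      rw [Bool.eq_iff_iff]
      simp [PySem.Dict.contains, List.any_map, List.any_eq_true]
    have hstep : (PySem.Dict.mk (S.map (fun k => (k, ".")))).insert n "." =
        PySem.Dict.mk ((PySem.Set.add S n).map (fun k => (k, "."))) := by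
      by_cases h : n ∈ S
      · apply PySem.Dict.ext
        rw [PySem.Dict.items_insert_of_contains _ _
          (by rw [hcont]; exact List.contains_iff_mem.2 h)]
        have : PySem.Set.add S n = S := by
          rw [PySem.Set.add, if_pos (by simpa [PySem.Set.contains] using List.contains_iff_mem.2 h)]
        rw [this]
        show List.map _ (List.map _ S) = _
        rw [List.map_map]
        apply List.map_congr_left
        intro k _
        by_cases hk : k = n <;> simp [hk]
      · apply PySem.Dict.ext
        rw [PySem.Dict.items_insert_of_not_contains _ _
          (by rw [hcont]; simpa [List.contains_iff_mem] using h)]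
        have : PySem.Set.add S n = S ++ [n] := by
          rw [PySem.Set.add, if_neg (by simpa [PySem.Set.contains, List.contains_iff_mem] using h)]
        rw [this]
        simp
    rw [hstep, ih, PySem.Set.update]
    rfl

theorem pv_ofList_snoc {α : Type} [BEq α] (T : List α) (t : α) :
    PySem.Set.ofList (T ++ [t]) = PySem.Set.add (PySem.Set.ofList T) t := by
  simp [PySem.Set.ofList_eq_foldl]

theorem pv_update_snoc {α : Type} [BEq α] (S : PySem.Set α) (T : List α) (t : α) :
    PySem.Set.update S (T ++ [t]) = PySem.Set.add (PySem.Set.update S T) t := by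
  simp [PySem.Set.update]

theorem pv_add_of_mem {α : Type} [BEq α] [LawfulBEq α] (S : PySem.Set α) (t : α) (h : t ∈ S) :
    PySem.Set.add S t = S := by
  rw [PySem.Set.add, if_pos]
  simpa [PySem.Set.contains, List.contains_iff_mem] using h

theorem pv_add_of_not_mem {α : Type} [BEq α] [LawfulBEq α] (S : PySem.Set α) (t : α) (h : t ∉ S) :
    PySem.Set.add S t = S ++ [t] := by
  rw [PySem.Set.add, if_neg]
  simpa [PySem.Set.contains, List.contains_iff_mem] using h

theorem pv_update_ofList (S : PySem.Set (List Int)) (T : List (List Int)) :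
    PySem.Set.update S (PySem.Set.ofList T) = PySem.Set.update S T := by
  induction T using List.reverseRecOn with
  | nil => rfl
  | append_singleton T t ih =>
    rw [pv_ofList_snoc, pv_update_snoc]
    by_cases h : t ∈ T
    · rw [pv_add_of_mem _ _ (by rw [PySem.Set.mem_ofList]; exact h), ih,
        pv_add_of_mem _ _ ((PySem.Set.mem_update S T t).2 (Or.inr h))]
    · rw [pv_add_of_not_mem _ _ (by rw [PySem.Set.mem_ofList]; exact h), PySem.Set.update,
        List.foldl_append]
      rw [PySem.Set.update] at ih
      simp [ih, PySem.Set.update]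

theorem pv_fold_update_eq_ofList (K : List (List Int × String)) (f : List Int × String → List (List Int)) :
    K.foldl (fun (s : PySem.Set (List Int)) pr => PySem.Set.update s (f pr)) [] =
      PySem.Set.ofList ((K.map f).flatten) := by
  rw [PySem.Set.ofList_eq_foldl, List.foldl_flatten, List.foldl_map]
  rfl

theorem pv_A_fold (c : PySem.Dict (List Int) String) (K : List (List Int × String))
    (S : List (List Int)) :
    K.foldl
      (fun (e : PySem.Dict (List Int) String) ps =>
        e.update (((get_neighbours ps.1).foldl
          (fun (m : PySem.Dict (List Int) String) n =>
            if c.contains n then m else m.insert n ".") PySem.Dict.empty).items))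
      (PySem.Dict.mk (S.map (fun k => (k, ".")))) =
    PySem.Dict.mk
      ((K.foldl
          (fun (s : PySem.Set (List Int)) pr =>
            PySem.Set.update s ((get_neighbours pr.1).filter (fun n => !c.contains n)))
          S).map (fun k => (k, "."))) := by
  induction K generalizing S with
  | nil => rfl
  | cons pr K ih =>
    rw [List.foldl_cons, List.foldl_cons]
    have hnd : (get_neighbours pr.1).foldl
        (fun (m : PySem.Dict (List Int) String) n =>
          if c.contains n then m else m.insert n ".") PySem.Dict.empty =
        PySem.Dict.mk ((PySem.Set.ofList ((get_neighbours pr.1).filter (fun n => !c.contains n))).map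
          (fun k => (k, "."))) := by
      have h1 : ((get_neighbours pr.1).filter (fun n => !c.contains n)).foldl
          (fun (m : PySem.Dict (List Int) String) n => m.insert n ".") PySem.Dict.empty =
          (get_neighbours pr.1).foldl
            (fun (m : PySem.Dict (List Int) String) n =>
              if c.contains n then m else m.insert n ".") PySem.Dict.empty := by
        rw [List.foldl_filter]
        apply PySem.List.foldl_congr_mem
        intro m n _
        by_cases h : c.contains n = true <;> simp [h]
      rw [← h1]
      have h2 : (PySem.Dict.empty : PySem.Dict (List Int) String) =
          PySem.Dict.mk (([] : List (List Int)).map (fun k => (k, "."))) := rfl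
      rw [h2, pv_insert_dot]
      rfl
    rw [hnd]
    have hupd : ∀ (T : List (List Int)),
        (PySem.Dict.mk (S.map (fun k => (k, ".")))).update
          ((PySem.Set.ofList T).map (fun k => (k, "."))) =
        PySem.Dict.mk ((PySem.Set.update S T).map (fun k => (k, "."))) := by
      intro T
      rw [PySem.Dict.update, List.foldl_map]
      have := pv_insert_dot (PySem.Set.ofList T) S
      rw [this, pv_update_ofList]
    rw [show ((PySem.Dict.mk ((PySem.Set.ofList ((get_neighbours pr.1).filter fun n => !c.contains n)).map
      fun k => (k, "."))).items) = ((PySem.Set.ofList ((get_neighbours pr.1).filter fun n => !c.contains n)).map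
      fun k => (k, ".")) from rfl, hupd, ih]

theorem pv_main (dim : List (List Int × String)) :
    get_expanded_dim dim = get_expanded_dim_alt dim := by
  rw [get_expanded_dim, get_expanded_dim_alt]
  set d : PySem.Dict (List Int) String := PySem.Dict.mk dim with hd
  have hA := pv_A_fold d dim []
  have hpair := pv_pair_outer (fun c => d.contains c) d.keys []
  have hinner : ∀ p ∈ d.keys, ∀ (s : PySem.Set (List Int)),
      (pvCells p).foldl (fun s c => if d.contains c then s else PySem.Set.add s c) s
        = PySem.Set.update s ((get_neighbours p).filter (fun n => !d.contains n)) := by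
    intro p hp s
    have hc : (fun n => !d.contains n) p = false := by
      simp [(PySem.Dict.contains_iff_mem_keys d p).2 hp]
    rw [pv_gfold_eq_update, pv_filter_cells (fun n => !d.contains n) p hc]
  have hF : d.keys.foldl (fun s p => (pvCells p).foldl
        (fun s c => if d.contains c then s else PySem.Set.add s c) s) [] =
      dim.foldl (fun (s : PySem.Set (List Int)) pr =>
        PySem.Set.update s ((get_neighbours pr.1).filter (fun n => !d.contains n))) [] := by
    have := PySem.List.foldl_congr_mem' (l := d.keys)
      (f := fun s p => (pvCells p).foldl
        (fun s c => if d.contains c then s else PySem.Set.add s c) s)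
      (g := fun s p => PySem.Set.update s ((get_neighbours p).filter (fun n => !d.contains n)))
      (init := ([] : PySem.Set (List Int)))
      (fun p hp s => hinner p hp s)
    rw [this]
    show (dim.map Prod.fst).foldl _ _ = _
    rw [List.foldl_map]
  refine congrArg (fun X : PySem.Dict (List Int) String => (X.update d.items).items) ?_
  set F := dim.foldl (fun (s : PySem.Set (List Int)) pr =>
      PySem.Set.update s ((get_neighbours pr.1).filter (fun n => !d.contains n))) [] with hFdef
  have hnodup : F.Nodup := by
    rw [hFdef, pv_fold_update_eq_ofList]
    exact PySem.Set.nodup_ofList _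
  have hout : F.foldl (fun (m : PySem.Dict (List Int) String) cell => m.insert cell ".")
      PySem.Dict.empty = PySem.Dict.mk (F.map (fun k => (k, "."))) := by
    have h0 : (PySem.Dict.empty : PySem.Dict (List Int) String)
        = PySem.Dict.mk (([] : List (List Int)).map (fun k => (k, "."))) := rfl
    rw [h0, pv_insert_dot]
    have hup : PySem.Set.update ([] : PySem.Set (List Int)) F = F := by
      rw [show PySem.Set.update ([] : PySem.Set (List Int)) F = PySem.Set.ofList F from rfl]
      exact PySem.Set.ofList_eq_self_of_nodup F hnodup
    rw [hup]
  have h2 : _ = F := (congrArg Prod.snd hpair).trans hF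
  exact hA.trans (hout.symm.trans (congrArg
    (fun L : List (List Int) => L.foldl
      (fun (m : PySem.Dict (List Int) String) cell => m.insert cell ".") PySem.Dict.empty)
    h2.symm))

-- ===== VERDICT (by name: the statement is the Claim_ definition above) =====
theorem get_expanded_dim_spec : Claim_equal_get_expanded_dim := by
  intro dim _
  exact pv_main dim
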